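-- pv_equiv track=rewrite | github.com/rbachati/dna_sequence_alignment | similarityalgo.py | calculate_max_contiguous_chain
-- ===== SOURCE A (Python) =====
-- def calculate_max_contiguous_chain(sequence1, sequence2, shift):
--     sequence2_shifted = sequence2[shift:] + " " * shift
--     max_chain = 0
--     current_chain = 0
--     for a, b in zip(sequence1, sequence2_shifted):
--         if a == b:
--             current_chain += 1
--             max_chain = max(max_chain, current_chain)
--         else:
--             current_chain = 0
--     return max_chain
-- ===== SOURCE B (Python) =====
-- def calculate_max_contiguous_chain(sequence1, sequence2, shift):
--     shifted = sequence2[shift:] + " " * shift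
--     n = min(len(sequence1), len(shifted))
--     # Mismatch positions act as boundaries; together with the virtual
--     # boundaries -1 and n, the answer is the largest gap between two
--     # consecutive boundaries (the number of matching positions between them).
--     boundaries = [-1] + [i for i in range(n) if sequence1[i] != shifted[i]] + [n]
--     return max(b - a - 1 for a, b in zip(boundaries, boundaries[1:]))
-- ===== Notes on version B (the rewrite author's own statement) =====
-- stated objective: alternative
-- what changed: B computes the list of mismatch positions and returns the largest gap between consecutive boundaries (-1, mismatch indices, n), instead of A's single-pass running-counter/running-max accumulator.
import Mathlib
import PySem

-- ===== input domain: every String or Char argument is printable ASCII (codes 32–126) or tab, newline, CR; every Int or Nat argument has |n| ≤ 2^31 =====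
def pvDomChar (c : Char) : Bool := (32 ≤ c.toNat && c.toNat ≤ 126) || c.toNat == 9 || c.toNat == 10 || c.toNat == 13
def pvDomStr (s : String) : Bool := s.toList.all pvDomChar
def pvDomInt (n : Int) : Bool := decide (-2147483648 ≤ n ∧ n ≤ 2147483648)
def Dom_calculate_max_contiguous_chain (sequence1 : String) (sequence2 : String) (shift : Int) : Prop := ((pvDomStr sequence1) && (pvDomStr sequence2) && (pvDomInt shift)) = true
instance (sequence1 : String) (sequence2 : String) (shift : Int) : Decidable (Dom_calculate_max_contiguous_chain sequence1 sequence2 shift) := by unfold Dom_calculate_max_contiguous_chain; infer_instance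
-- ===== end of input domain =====

-- B replaces A's running-counter/running-max scan with a boundary decomposition:
-- it collects the mismatch positions and returns the largest gap between
-- consecutive boundaries (-1, mismatch indices, n); alternative, same cost.

-- ===== PORT A =====
-- running max_chain/current_chain counter over zip(sequence1, sequence2_shifted)
def calculate_max_contiguous_chain (sequence1 : String) (sequence2 : String) (shift : Int) : Int :=
  let sequence2_shifted : List Char :=
    PySem.List.slice sequence2.toList (some shift) none ++ PySem.List.pyRepeat [' '] shift
  let st := (List.zip sequence1.toList sequence2_shifted).foldl
    (fun (mc : Int × Int) ab =>
      if ab.1 == ab.2 then (max mc.1 (mc.2 + 1), mc.2 + 1) else (mc.1, 0))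
    (0, 0)
  st.1

-- ===== PORT B =====
def calculate_max_contiguous_chain_alt (sequence1 : String) (sequence2 : String) (shift : Int) : Int :=
  let shifted : List Char :=
    PySem.List.slice sequence2.toList (some shift) none ++ PySem.List.pyRepeat [' '] shift
  let n : Nat := min sequence1.toList.length shifted.length
  let boundaries : List Int :=
    [(-1 : Int)]
      ++ ((List.range n).filter
            (fun i => !(sequence1.toList.getD i ' ' == shifted.getD i ' '))).map
            (fun i => Int.ofNat i)
      ++ [(n : Int)]
  -- max(b - a - 1 for a, b in zip(boundaries, boundaries[1:])); boundaries has
  -- ≥ 2 elements, so the gap list is nonempty and the .getD 0 is unreachable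
  (PySem.List.max? ((List.zip boundaries (boundaries.drop 1)).map
      (fun ab => ab.2 - ab.1 - 1)) (fun x => x)).getD 0

-- ===== PRECONDITION & SPEC =====
def Spec_calculate_max_contiguous_chain (sequence1 : String) (sequence2 : String) (shift : Int) (out : Int) : Prop := out = calculate_max_contiguous_chain_alt sequence1 sequence2 shift
instance (sequence1 : String) (sequence2 : String) (shift : Int) (out : Int) : Decidable (Spec_calculate_max_contiguous_chain sequence1 sequence2 shift out) := by unfold Spec_calculate_max_contiguous_chain; infer_instance

-- ===== CLAIM (what is proved, stated in full; the proofs are below) =====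
def Claim_equal_calculate_max_contiguous_chain : Prop := ∀ (sequence1 : String) (sequence2 : String) (shift : Int), Dom_calculate_max_contiguous_chain sequence1 sequence2 shift → Spec_calculate_max_contiguous_chain sequence1 sequence2 shift (calculate_max_contiguous_chain sequence1 sequence2 shift)

-- ===== LEMMAS AND PROOFS =====

-- A's loop body
def pvFA : Int × Int → Char × Char → Int × Int :=
  fun mc ab => if ab.1 == ab.2 then (max mc.1 (mc.2 + 1), mc.2 + 1) else (mc.1, 0)

-- max gap between consecutive boundaries, previous boundary carried along
def pvG : Int → List Int → Int
  | _, [] => 0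
  | a, b :: l => max (b - a - 1) (pvG b l)

-- last element of a :: l
def pvLastD (a : Int) (l : List Int) : Int := l.foldl (fun _ x => x) a

-- mismatch positions of a zipped pair list
def pvMis (ps : List (Char × Char)) : List Nat :=
  (List.range ps.length).filter
    (fun i => !((ps.getD i (' ', ' ')).1 == (ps.getD i (' ', ' ')).2))

def pvMisI (ps : List (Char × Char)) : List Int := (pvMis ps).map (fun i => Int.ofNat i)

lemma pvG_nonneg (l : List Int) : ∀ a, 0 ≤ pvG a l := by
  induction l with
  | nil => intro a; simp [pvG]
  | cons b l ih => intro a; simp only [pvG]; have := ih b; omega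

lemma pvLastD_cons (a b : Int) (l : List Int) : pvLastD a (b :: l) = pvLastD b l := rfl

lemma pvLastD_snoc (a x : Int) (l : List Int) : pvLastD a (l ++ [x]) = x := by
  simp [pvLastD]

lemma pvG_snoc (l : List Int) : ∀ (a x : Int),
    pvG a (l ++ [x]) = max (pvG a l) (x - pvLastD a l - 1) := by
  induction l with
  | nil => intro a x; simp [pvG, pvLastD]; omega
  | cons b l ih =>
    intro a x
    simp only [List.cons_append, pvG, ih b x, pvLastD_cons]
    omega

lemma pvFoldlMax_init (t : List Int) : ∀ (x y : Int),
    t.foldl max (max x y) = max x (t.foldl max y) := by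
  induction t with
  | nil => intro x y; rfl
  | cons z t ih =>
    intro x y
    simp only [List.foldl_cons]
    rw [max_assoc, ih]

lemma pvMaxCons (x : Int) (t : List Int) (h : t ≠ []) :
    (PySem.List.max? (x :: t) (fun y => y)).getD 0
      = max x ((PySem.List.max? t (fun y => y)).getD 0) := by
  cases t with
  | nil => exact absurd rfl h
  | cons y t' =>
    rw [PySem.List.max?_id_cons, PySem.List.max?_id_cons]
    simp [pvFoldlMax_init]

-- B's max-of-gaps expression equals pvG on strictly increasing boundaries
lemma pvValB (rest : List Int) : ∀ (a : Int), rest ≠ [] →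
    List.Pairwise (· < ·) (a :: rest) →
    (PySem.List.max? ((List.zip (a :: rest) rest).map
        (fun ab => ab.2 - ab.1 - 1)) (fun x => x)).getD 0 = pvG a rest := by
  induction rest with
  | nil => intro a h; exact absurd rfl h
  | cons b l ih =>
    intro a _ hp
    cases l with
    | nil =>
      have hab : a < b := by
        have := List.pairwise_cons.1 hp
        exact this.1 b (by simp)
      simp only [List.zip_cons_cons, List.zip_nil_right, List.map_cons, List.map_nil]
      rw [PySem.List.max?_id_cons]
      simp [pvG]
      omega
    | cons c l' =>
      have hp' : List.Pairwise (· < ·) (b :: c :: l') := (List.pairwise_cons.1 hp).2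
      have hrec := ih b (by simp) hp'
      simp only [List.zip_cons_cons, List.map_cons] at hrec ⊢
      rw [pvMaxCons _ _ (by simp), hrec]
      rfl

-- appending one pair appends its index to the mismatch list iff it mismatches
lemma pvMis_snoc (ps : List (Char × Char)) (p : Char × Char) :
    pvMis (ps ++ [p]) = pvMis ps ++ (if p.1 == p.2 then [] else [ps.length]) := by
  unfold pvMis
  rw [List.length_append, List.length_singleton, List.range_succ, List.filter_append]
  congr 1
  · apply List.filter_congr
    intro i hi
    have hilt : i < ps.length := List.mem_range.1 hi
    rw [List.getD_append _ _ _ _ hilt]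
  · by_cases h : p.1 == p.2 <;> simp [List.filter, h, List.getD]

-- main invariant: A's fold state = (max gap so far, length of the trailing run)
lemma pvInv (ps : List (Char × Char)) :
    ps.foldl pvFA (0, 0)
      = (pvG (-1) (pvMisI ps ++ [(ps.length : Int)]),
         (ps.length : Int) - 1 - pvLastD (-1) (pvMisI ps)) := by
  induction ps using List.reverseRecOn with
  | nil => simp [pvMisI, pvMis, pvG, pvLastD]
  | append_singleton ps p ih =>
    rw [List.foldl_append, ih]
    have hlen1 : (ps ++ [p]).length = ps.length + 1 := by simp
    rw [hlen1]
    have hmis : pvMisI (ps ++ [p])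
        = pvMisI ps ++ (if p.1 == p.2 then [] else [Int.ofNat ps.length]) := by
      unfold pvMisI
      rw [pvMis_snoc]
      by_cases h : p.1 == p.2 <;> simp [h]
    by_cases h : p.1 == p.2
    · simp only [List.foldl_cons, List.foldl_nil, pvFA, h, if_pos, hmis, List.append_nil]
      rw [Prod.mk.injEq]
      rw [pvG_snoc, pvG_snoc]
      constructor
      · push_cast; omega
      · push_cast; omega
    · simp only [List.foldl_cons, List.foldl_nil, pvFA, h, Bool.false_eq_true, if_false, hmis]
      rw [Prod.mk.injEq]
      constructor
      · have hofNat : (Int.ofNat ps.length) = (ps.length : Int) := rfl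
        rw [hofNat, pvG_snoc (pvMisI ps ++ [(ps.length : Int)]), pvLastD_snoc]
        have h0 := pvG_nonneg (pvMisI ps ++ [(ps.length : Int)]) (-1)
        push_cast
        omega
      · have hofNat : (Int.ofNat ps.length) = (ps.length : Int) := rfl
        rw [hofNat, pvLastD_snoc]; push_cast; omega

-- elements of the mismatch list lie in [0, n)
lemma pvMis_mem (ps : List (Char × Char)) (i : Nat) (h : i ∈ pvMis ps) : i < ps.length := by
  unfold pvMis at h
  exact List.mem_range.1 (List.mem_of_mem_filter h)

-- boundaries are strictly increasing
lemma pvBoundsPairwise (ps : List (Char × Char)) :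
    List.Pairwise (· < ·) ((-1 : Int) :: (pvMisI ps ++ [(ps.length : Int)])) := by
  have hmono : List.Pairwise (· < ·) (pvMisI ps) := by
    unfold pvMisI
    rw [List.pairwise_map]
    have hpf : List.Pairwise (· < ·) (pvMis ps) :=
      List.Pairwise.filter _ List.pairwise_lt_range
    exact hpf.imp (fun hab => Int.ofNat_lt.mpr hab)
  refine List.pairwise_cons.2 ⟨?_, ?_⟩
  · intro x hx
    rcases List.mem_append.1 hx with hx | hx
    · rcases List.mem_map.1 hx with ⟨i, _, rfl⟩
      have : (Int.ofNat i) = (i : Int) := rfl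
      omega
    · simp at hx; omega
  · refine List.pairwise_append.2 ⟨hmono, by simp, ?_⟩
    intro x hx y hy
    rcases List.mem_map.1 hx with ⟨i, hi, rfl⟩
    have h1 := pvMis_mem ps i hi
    simp at hy
    have : (Int.ofNat i) = (i : Int) := rfl
    omega

-- bridge: A's fold equals B's max-of-gaps, over the shared zipped list
lemma pvMain (l1 sh : List Char) :
    ((List.zip l1 sh).foldl
        (fun (mc : Int × Int) ab =>
          if ab.1 == ab.2 then (max mc.1 (mc.2 + 1), mc.2 + 1) else (mc.1, 0)) (0, 0)).1
      = (PySem.List.max?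
          ((List.zip
              ([(-1 : Int)]
                ++ ((List.range (min l1.length sh.length)).filter
                      (fun i => !(l1.getD i ' ' == sh.getD i ' '))).map (fun i => Int.ofNat i)
                ++ [((min l1.length sh.length : Nat) : Int)])
              (([(-1 : Int)]
                ++ ((List.range (min l1.length sh.length)).filter
                      (fun i => !(l1.getD i ' ' == sh.getD i ' '))).map (fun i => Int.ofNat i)
                ++ [((min l1.length sh.length : Nat) : Int)]).drop 1)).map
            (fun ab => ab.2 - ab.1 - 1)) (fun x => x)).getD 0 := by
  set n := min l1.length sh.length with hn
  set ps := List.zip l1 sh with hps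
  have hlen : ps.length = n := by rw [hps, List.length_zip, hn]
  have hfil : (List.range n).filter (fun i => !(l1.getD i ' ' == sh.getD i ' ')) = pvMis ps := by
    unfold pvMis
    rw [hlen]
    apply List.filter_congr
    intro i hi
    have hilt : i < n := List.mem_range.1 hi
    have h1 : i < l1.length := lt_of_lt_of_le hilt (by rw [hn]; exact min_le_left _ _)
    have h2 : i < sh.length := lt_of_lt_of_le hilt (by rw [hn]; exact min_le_right _ _)
    have hip : i < ps.length := by rw [hlen]; exact hilt
    have hgd : ps.getD i (' ', ' ') = (l1[i], sh[i]) := by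
      rw [List.getD_eq_getElem _ _ hip]
      simp [hps]
    rw [hgd, List.getD_eq_getElem _ _ h1, List.getD_eq_getElem _ _ h2]
  have hA : (ps.foldl
      (fun (mc : Int × Int) ab =>
        if ab.1 == ab.2 then (max mc.1 (mc.2 + 1), mc.2 + 1) else (mc.1, 0)) (0, 0)).1
      = pvG (-1) (pvMisI ps ++ [(n : Int)]) := by
    have : (ps.foldl pvFA (0, 0)).1 = pvG (-1) (pvMisI ps ++ [(ps.length : Int)]) := by
      rw [pvInv ps]
    rw [hlen] at this
    exact this
  rw [hA, hfil]
  have hpw := pvBoundsPairwise ps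
  rw [hlen] at hpw
  have hval := pvValB (pvMisI ps ++ [(n : Int)]) (-1) (by simp) hpw
  simp only [List.singleton_append, List.drop_one] at hval ⊢
  exact hval.symm

-- ===== VERDICT (by name: the statement is the Claim_ definition above) =====
theorem calculate_max_contiguous_chain_spec : Claim_equal_calculate_max_contiguous_chain := by
  intro s1 s2 shift _
  unfold Spec_calculate_max_contiguous_chain calculate_max_contiguous_chain calculate_max_contiguous_chain_alt
  exact pvMain s1.toList
    (PySem.List.slice s2.toList (some shift) none ++ PySem.List.pyRepeat [' '] shift)
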